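-- pv_equiv track=rewrite | github.com/Alebep/pipelineDensityMapCountAndMeasureFish | src/fish_pipeline/utils/geometry.py | bounding_box_from_mask
-- ===== SOURCE A (Python) =====
-- from typing import Iterable, List, Sequence, Tuple
--
-- def bounding_box_from_mask(mask: Sequence[Sequence[bool]]) -> Tuple[int, int, int, int]:
--     ys = []
--     xs = []
--     for y, row in enumerate(mask):
--         for x, value in enumerate(row):
--             if value:
--                 xs.append(x)
--                 ys.append(y)
--     if not xs:
--         return 0, 0, 0, 0
--     x_min = min(xs)
--     x_max = max(xs)
--     y_min = min(ys)
--     y_max = max(ys)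
--     return x_min, y_min, x_max - x_min + 1, y_max - y_min + 1
-- ===== SOURCE B (Python) =====
-- def bounding_box_from_mask(mask):
--     found = False
--     x_min = y_min = x_max = y_max = 0
--     for y, row in enumerate(mask):
--         for x, value in enumerate(row):
--             if value:
--                 if not found:
--                     found = True
--                     x_min = x_max = x
--                     y_min = y_max = y
--                 else:
--                     if x < x_min:
--                         x_min = x
--                     if y < y_min:
--                         y_min = y
--                     if x_max < x:
--                         x_max = x
--                     if y_max < y:
--                         y_max = y
--     if not found:
--         return 0, 0, 0, 0
--     return x_min, y_min, x_max - x_min + 1, y_max - y_min + 1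
-- ===== Notes on version B (the rewrite author's own statement) =====
-- stated objective: simpler
-- what changed: Replaced the collect-all-coordinates-then-four-reduction-scans approach by a single pass that maintains four running extremes and a found flag, using O(1) extra memory instead of two coordinate lists.
import Mathlib
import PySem

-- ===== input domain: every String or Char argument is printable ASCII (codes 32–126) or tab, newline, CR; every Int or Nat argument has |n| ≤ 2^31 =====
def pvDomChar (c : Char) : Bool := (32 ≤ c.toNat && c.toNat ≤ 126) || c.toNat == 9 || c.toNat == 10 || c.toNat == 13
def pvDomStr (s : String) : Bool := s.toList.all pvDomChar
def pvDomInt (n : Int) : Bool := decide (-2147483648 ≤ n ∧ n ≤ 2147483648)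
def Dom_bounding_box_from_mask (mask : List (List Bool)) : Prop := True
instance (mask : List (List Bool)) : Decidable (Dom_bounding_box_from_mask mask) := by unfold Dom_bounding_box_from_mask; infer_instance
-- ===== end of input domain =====

-- B replaces A's coordinate lists + four min/max scans by one pass keeping four running extremes and a found flag (simpler, O(1) extra space).


-- ===== PORT A =====
-- literal transliteration: collect xs/ys of all true cells, then min/max of each list
-- (Python's min/max on a nonempty list; the `.getD 0` defaults are unreachable under the xs ≠ [] guard)
def bounding_box_from_mask (mask : List (List Bool)) : Int × Int × Int × Int :=
  let acc : List Int × List Int :=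
    (PySem.List.enumerate mask).foldl (fun acc yr =>
      (PySem.List.enumerate yr.2).foldl (fun acc2 xv =>
        if xv.2 then (acc2.1 ++ [yr.1], acc2.2 ++ [xv.1]) else acc2) acc) ([], [])
  if acc.2 = [] then (0, 0, 0, 0)
  else
    let x_min := (PySem.List.min? acc.2 (fun v => v)).getD 0
    let x_max := (PySem.List.max? acc.2 (fun v => v)).getD 0
    let y_min := (PySem.List.min? acc.1 (fun v => v)).getD 0
    let y_max := (PySem.List.max? acc.1 (fun v => v)).getD 0
    (x_min, y_min, x_max - x_min + 1, y_max - y_min + 1)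

-- ===== PORT B =====
-- B's loop body: state (found, x_min, y_min, x_max, y_max), update at a true cell (x, y)
def bboxUpd (s : Bool × Int × Int × Int × Int) (p : Int × Int) : Bool × Int × Int × Int × Int :=
  if s.1 = false then (true, p.1, p.2, p.1, p.2)
  else (true,
        if p.1 < s.2.1 then p.1 else s.2.1,
        if p.2 < s.2.2.1 then p.2 else s.2.2.1,
        if s.2.2.2.1 < p.1 then p.1 else s.2.2.2.1,
        if s.2.2.2.2 < p.2 then p.2 else s.2.2.2.2)

def bounding_box_from_mask_alt (mask : List (List Bool)) : Int × Int × Int × Int :=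
  let s : Bool × Int × Int × Int × Int :=
    (PySem.List.enumerate mask).foldl (fun s yr =>
      (PySem.List.enumerate yr.2).foldl (fun s xv =>
        if xv.2 then bboxUpd s (xv.1, yr.1) else s) s) (false, 0, 0, 0, 0)
  if s.1 = false then (0, 0, 0, 0)
  else (s.2.1, s.2.2.1, s.2.2.2.1 - s.2.1 + 1, s.2.2.2.2 - s.2.2.1 + 1)

-- ===== PRECONDITION & SPEC =====
def Spec_bounding_box_from_mask (mask : List (List Bool)) (out : Int × Int × Int × Int) : Prop := out = bounding_box_from_mask_alt mask
instance (mask : List (List Bool)) (out : Int × Int × Int × Int) : Decidable (Spec_bounding_box_from_mask mask out) := by unfold Spec_bounding_box_from_mask; infer_instance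

-- ===== CLAIM (what is proved, stated in full; the proofs are below) =====
def Claim_equal_bounding_box_from_mask : Prop := ∀ (mask : List (List Bool)), Dom_bounding_box_from_mask mask → Spec_bounding_box_from_mask mask (bounding_box_from_mask mask)

-- ===== LEMMAS AND PROOFS =====

-- the true cells of a (already enumerated) row as (x, y) points, in scan order
def rowPtsL (y : Int) (l : List (Int × Bool)) : List (Int × Int) :=
  (l.filter (·.2)).map (fun xv => (xv.1, y))

def rowPts (y : Int) (row : List Bool) : List (Int × Int) :=
  rowPtsL y (PySem.List.enumerate row)

theorem int_min_alt (a x : Int) : (if x < a then x else a) = min a x := by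
  rw [min_def]; split_ifs <;> omega

theorem int_max_alt (a x : Int) : (if a < x then x else a) = max a x := by
  rw [max_def]; split_ifs <;> omega

-- ---- A side ----

theorem innerA_eq (y : Int) (l : List (Int × Bool)) (a b : List Int) :
    l.foldl (fun acc2 xv =>
        if xv.2 then (acc2.1 ++ [y], acc2.2 ++ [xv.1]) else acc2) (a, b)
      = (a ++ (rowPtsL y l).map (·.2), b ++ (rowPtsL y l).map (·.1)) := by
  induction l generalizing a b with
  | nil => simp [rowPtsL]
  | cons q t ih =>
    by_cases h : q.2 = true <;>
      simp [List.foldl_cons, h, ih, rowPtsL]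

theorem outerA_eq (rows : List (Int × List Bool)) (a b : List Int) :
    rows.foldl (fun acc yr =>
        (PySem.List.enumerate yr.2).foldl (fun acc2 xv =>
          if xv.2 then (acc2.1 ++ [yr.1], acc2.2 ++ [xv.1]) else acc2) acc) (a, b)
      = (a ++ (rows.flatMap (fun yr => rowPts yr.1 yr.2)).map (·.2),
         b ++ (rows.flatMap (fun yr => rowPts yr.1 yr.2)).map (·.1)) := by
  induction rows generalizing a b with
  | nil => simp
  | cons r t ih => simp [List.foldl_cons, innerA_eq, ih, rowPts]

-- ---- B side ----

theorem innerB_eq (y : Int) (l : List (Int × Bool)) (s : Bool × Int × Int × Int × Int) :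
    l.foldl (fun s xv => if xv.2 then bboxUpd s (xv.1, y) else s) s
      = (rowPtsL y l).foldl bboxUpd s := by
  induction l generalizing s with
  | nil => rfl
  | cons q t ih =>
    by_cases h : q.2 = true <;>
      simp [List.foldl_cons, h, ih, rowPtsL]

theorem outerB_eq (rows : List (Int × List Bool)) (s : Bool × Int × Int × Int × Int) :
    rows.foldl (fun s yr =>
        (PySem.List.enumerate yr.2).foldl (fun s xv =>
          if xv.2 then bboxUpd s (xv.1, yr.1) else s) s) s
      = (rows.flatMap (fun yr => rowPts yr.1 yr.2)).foldl bboxUpd s := by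
  induction rows generalizing s with
  | nil => rfl
  | cons r t ih =>
    rw [List.foldl_cons, innerB_eq, List.flatMap_cons, List.foldl_append, ih, rowPts]

-- running B's update over points, once found, computes running min/max of the coordinates
theorem bboxRun (pts : List (Int × Int)) :
    ∀ xm ym xM yM, pts.foldl bboxUpd (true, xm, ym, xM, yM)
      = (true, (pts.map (·.1)).foldl min xm, (pts.map (·.2)).foldl min ym,
               (pts.map (·.1)).foldl max xM, (pts.map (·.2)).foldl max yM) := by
  induction pts with
  | nil => intro xm ym xM yM; rfl
  | cons p t ih =>
    intro xm ym xM yM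
    simp only [List.foldl_cons, List.map_cons]
    rw [show bboxUpd (true, xm, ym, xM, yM) p
          = (true, min xm p.1, min ym p.2, max xM p.1, max yM p.2) from by
        simp [bboxUpd, int_min_alt, int_max_alt], ih]

-- ===== VERDICT (by name: the statement is the Claim_ definition above) =====
theorem bounding_box_from_mask_spec : Claim_equal_bounding_box_from_mask := by
  intro mask _
  unfold Spec_bounding_box_from_mask bounding_box_from_mask bounding_box_from_mask_alt
  rw [outerA_eq, outerB_eq]
  cases h : (PySem.List.enumerate mask).flatMap (fun yr => rowPts yr.1 yr.2) with
  | nil => simp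
  | cons p t =>
    simp only [List.nil_append, List.map_cons, List.foldl_cons]
    rw [show bboxUpd (false, 0, 0, 0, 0) (p.1, p.2) = (true, p.1, p.2, p.1, p.2) from by
      simp [bboxUpd]]
    rw [bboxRun]
    simp [PySem.List.min?_id_cons, PySem.List.max?_id_cons]
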